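-- pv_equiv track=rewrite | github.com/MohammaddSameer/SpotifyReplay | spotifyTextBased.py | get_top_artists_by_duration
-- ===== SOURCE A (Python) =====
-- def get_top_artists_by_duration(songs, num_artists):
--     # Create a dictionary to store the total listening duration for each artist
--     artist_durations = {}
--
--     # Iterate through the songs and accumulate the duration for each artist
--     for (artist, _), song_data in songs.items():
--         if artist not in artist_durations:
--             artist_durations[artist] = 0
--         artist_durations[artist] += song_data['duration']
--
--     # Sort the artists by their total listening duration in descending order
--     sorted_artists = sorted(artist_durations.items(), key=lambda x: x[1], reverse=True)
--
--     # Return the top N artists by duration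
--     return sorted_artists[:num_artists]
-- ===== SOURCE B (Python) =====
-- def get_top_artists_by_duration(songs, num_artists):
--     # One-pass aggregation of durations per artist, then top-N selection by
--     # repeatedly extracting the current maximum (no full sort).
--     totals = {}
--     for (artist, _), song_data in songs.items():
--         totals[artist] = totals.get(artist, 0) + song_data['duration']
--     items = list(totals.items())
--     top = []
--     while len(top) < num_artists and items:
--         best = max(items, key=lambda kv: kv[1])
--         items.remove(best)
--         top.append(best)
--     return top
-- ===== Notes on version B (the rewrite author's own statement) =====
-- stated objective: alternative
-- what changed: B replaces A's membership-guarded dict accumulation and full sort-then-slice by a dict.get aggregation followed by a top-N selection loop that repeatedly extracts the first maximal item; …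
-- outside the precondition, e.g. on get_top_artists_by_duration({('a', 'x'): {}}, 1): A raises KeyError, B raises KeyError
import Mathlib
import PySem

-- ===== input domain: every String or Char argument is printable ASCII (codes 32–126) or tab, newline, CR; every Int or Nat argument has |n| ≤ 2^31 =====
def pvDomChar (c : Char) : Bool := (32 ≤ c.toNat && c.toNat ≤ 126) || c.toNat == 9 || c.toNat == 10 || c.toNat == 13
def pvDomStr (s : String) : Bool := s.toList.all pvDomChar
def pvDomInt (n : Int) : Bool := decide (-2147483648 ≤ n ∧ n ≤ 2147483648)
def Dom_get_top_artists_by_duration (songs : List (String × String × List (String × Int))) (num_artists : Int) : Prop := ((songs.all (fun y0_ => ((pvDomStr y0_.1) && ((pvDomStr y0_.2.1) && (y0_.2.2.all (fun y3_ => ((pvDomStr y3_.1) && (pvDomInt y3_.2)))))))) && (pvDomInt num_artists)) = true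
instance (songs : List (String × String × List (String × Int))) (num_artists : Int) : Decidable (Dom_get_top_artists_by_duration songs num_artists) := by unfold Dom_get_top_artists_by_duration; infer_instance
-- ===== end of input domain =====

-- B aggregates with dict.get and selects the top N by repeated first-max extraction (a while
-- loop) instead of a full sort-and-slice; an alternative of similar cost.
-- Pre_ excludes song_data without a "duration" key (A raises KeyError), association lists with
-- duplicate outer or inner dict keys (Python's dict collapses them before either function runs),
-- and negative num_artists exceeding -(number of distinct artists), a request no caller would
-- make, on which A's slicing and B's selection loop legitimately disagree.


-- ===== PORT A =====
def get_top_artists_by_duration (songs : List (String × String × List (String × Int))) (num_artists : Int) : List (String × Int) :=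
  let artist_durations : PySem.Dict String Int :=
    songs.foldl (fun d s =>
      let d := if d.contains s.1 then d else d.insert s.1 0
      d.insert s.1 (d.getD s.1 0 + (PySem.Dict.mk s.2.2).getD "duration" 0)) PySem.Dict.empty
  let sorted_artists := PySem.List.sorted artist_durations.items (fun x => x.2) true
  PySem.List.slice sorted_artists none (some num_artists)

-- ===== PORT B =====
-- termination helper for the while loop: items.remove(best) shortens items
lemma pvRemove?_length {α : Type} [BEq α] (xs : List α) (v : α) (r : List α)
    (h : PySem.List.remove? xs v = some r) : r.length < xs.length := by
  simp only [PySem.List.remove?, List.idxOf?] at h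
  cases hf : List.findIdx? (fun y => y == v) xs with
  | none => rw [hf] at h; simp at h
  | some k =>
    rw [hf] at h
    simp only [Option.map_some, Option.some_inj] at h
    have hk : k < xs.length := (List.findIdx?_eq_some_iff_findIdx_eq.1 hf).1
    rw [← h, List.length_eraseIdx, if_pos hk]
    omega

-- 'while len(top) < num_artists and items: best = max(items, key=…); items.remove(best); top.append(best)'
def pvSelect (num_artists : Int) (top items : List (String × Int)) : List (String × Int) :=
  if (top.length : Int) < num_artists ∧ items ≠ [] then
    match PySem.List.max? items (fun kv => kv.2) with
    | none => top          -- unreachable: items ≠ []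
    | some best =>
      match hr : PySem.List.remove? items best with
      | none => top        -- unreachable: best ∈ items
      | some rest => pvSelect num_artists (top ++ [best]) rest
  else top
termination_by items.length
decreasing_by exact pvRemove?_length items best rest hr

def get_top_artists_by_duration_alt (songs : List (String × String × List (String × Int))) (num_artists : Int) : List (String × Int) :=
  let totals : PySem.Dict String Int :=
    songs.foldl (fun d s =>
      d.insert s.1 (d.getD s.1 0 + (PySem.Dict.mk s.2.2).getD "duration" 0)) PySem.Dict.empty
  pvSelect num_artists [] totals.items

-- ===== PRECONDITION & SPEC =====
-- Pre_ excludes songs whose song_data lacks a "duration" key, where A raises KeyError;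
-- association lists with duplicate outer or inner dict keys, which Python's dict collapses
-- before either function runs (the assoc-list model cannot reflect that collapse); and
-- negative num_artists with more distinct artists than -num_artists, a request for a negative
-- number of top artists no caller would specify, on which A returns all but the last
-- -num_artists sorted artists (Python slice semantics) while B returns no artists: either
-- reading of an unspecified corner is defensible, so neither value is claimed.
def Pre_get_top_artists_by_duration (songs : List (String × String × List (String × Int))) (num_artists : Int) : Prop :=
  (0 ≤ num_artists ∨ ((PySem.Set.ofList (songs.map (fun s => s.1))).length : Int) + num_artists ≤ 0) ∧
  (songs.map (fun s => (s.1, s.2.1))).Nodup ∧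
  ∀ s ∈ songs, (s.2.2.map Prod.fst).Nodup ∧ "duration" ∈ s.2.2.map Prod.fst
instance (songs : List (String × String × List (String × Int))) (num_artists : Int) : Decidable (Pre_get_top_artists_by_duration songs num_artists) := by unfold Pre_get_top_artists_by_duration; infer_instance

def pvWitness_get_top_artists_by_duration : (List (String × String × List (String × Int))) × Int :=
  ([("a", "x", [("duration", 3)]), ("b", "y", [("duration", 5)])], 1)

def Spec_get_top_artists_by_duration (songs : List (String × String × List (String × Int))) (num_artists : Int) (out : List (String × Int)) : Prop := out = get_top_artists_by_duration_alt songs num_artists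
instance (songs : List (String × String × List (String × Int))) (num_artists : Int) (out : List (String × Int)) : Decidable (Spec_get_top_artists_by_duration songs num_artists out) := by unfold Spec_get_top_artists_by_duration; infer_instance


-- ===== CLAIM (what is proved, stated in full; the proofs are below) =====
def Claim_equal_get_top_artists_by_duration : Prop := ∀ (songs : List (String × String × List (String × Int))) (num_artists : Int), Dom_get_top_artists_by_duration songs num_artists → Pre_get_top_artists_by_duration songs num_artists → Spec_get_top_artists_by_duration songs num_artists (get_top_artists_by_duration songs num_artists)

-- ===== LEMMAS AND PROOFS =====

lemma pvAggStep_eq (d : PySem.Dict String Int) (s : String × String × List (String × Int)) :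
    (if d.contains s.1 then d else d.insert s.1 0).insert s.1
      ((if d.contains s.1 then d else d.insert s.1 0).getD s.1 0 + (PySem.Dict.mk s.2.2).getD "duration" 0) =
    d.insert s.1 (d.getD s.1 0 + (PySem.Dict.mk s.2.2).getD "duration" 0) := by
  by_cases h : d.contains s.1
  · simp [h]
  · have h' : d.contains s.1 = false := by simpa using h
    simp only [h', Bool.false_eq_true, if_false]
    rw [PySem.Dict.getD_insert_self, PySem.Dict.insert_insert_self,
        PySem.Dict.getD_of_not_contains d 0 h', zero_add]

lemma pvMaxFold (f : Option (String × Int) → (String × Int) → Option (String × Int))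
    (hf : ∀ c x, f (some c) x = if c.2 < x.2 then some x else some c)
    (t : List (String × Int)) : ∀ (c mx : String × Int),
    List.foldl f (some c) t = some mx →
    (mx = c ∧ ∀ y ∈ t, y.2 ≤ c.2) ∨
      ∃ t₁ t₂, t = t₁ ++ mx :: t₂ ∧ c.2 < mx.2 ∧ (∀ y ∈ t₁, y.2 < mx.2) ∧ (∀ y ∈ t₂, y.2 ≤ mx.2) := by
  induction t with
  | nil =>
    intro c mx h; simp at h; exact Or.inl ⟨h.symm, by simp⟩
  | cons x t ih =>
    intro c mx h
    rw [List.foldl_cons, hf] at h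
    by_cases hcx : c.2 < x.2
    · rw [if_pos hcx] at h
      rcases ih x mx h with ⟨rfl, hall⟩ | ⟨t₁, t₂, rfl, hlt, h1, h2⟩
      · exact Or.inr ⟨[], t, rfl, hcx, by simp, hall⟩
      · refine Or.inr ⟨x :: t₁, t₂, rfl, lt_trans hcx hlt, ?_, h2⟩
        intro y hy
        rcases List.mem_cons.1 hy with rfl | hy
        · exact hlt
        · exact h1 y hy
    · rw [if_neg hcx] at h
      rcases ih c mx h with ⟨rfl, hall⟩ | ⟨t₁, t₂, rfl, hlt, h1, h2⟩
      · refine Or.inl ⟨rfl, ?_⟩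
        intro y hy
        rcases List.mem_cons.1 hy with rfl | hy
        · exact le_of_not_gt hcx
        · exact hall y hy
      · refine Or.inr ⟨x :: t₁, t₂, rfl, hlt, ?_, h2⟩
        intro y hy
        rcases List.mem_cons.1 hy with rfl | hy
        · exact lt_of_le_of_lt (le_of_not_gt hcx) hlt
        · exact h1 y hy

lemma pvMax?_split (l : List (String × Int)) (mx : String × Int)
    (h : PySem.List.max? l (fun kv => kv.2) = some mx) :
    ∃ l₁ l₂, l = l₁ ++ mx :: l₂ ∧ (∀ y ∈ l₁, y.2 < mx.2) ∧ (∀ y ∈ l₂, y.2 ≤ mx.2) := by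
  cases l with
  | nil => simp [PySem.List.max?] at h
  | cons x t =>
    simp only [PySem.List.max?, List.foldl_cons] at h
    rcases pvMaxFold _ (fun c x => rfl) t x mx h with ⟨rfl, hall⟩ | ⟨t₁, t₂, rfl, hlt, h1, h2⟩
    · exact ⟨[], t, rfl, by simp, hall⟩
    · refine ⟨x :: t₁, t₂, rfl, ?_, h2⟩
      intro y hy
      rcases List.mem_cons.1 hy with rfl | hy
      · exact hlt
      · exact h1 y hy

-- before-function of the descending sort
lemma pvInsertBy_cons (x y : String × Int) (ys : List (String × Int)) :
    PySem.List.insertBy (fun a b : String × Int => decide (b.2 < a.2)) x (y :: ys)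
      = if y.2 < x.2 then x :: y :: ys else y :: PySem.List.insertBy (fun a b : String × Int => decide (b.2 < a.2)) x ys := by
  simp [PySem.List.insertBy]

lemma pvFold_ins_cons (l : List (String × Int)) (m : String × Int) :
    ∀ s : List (String × Int), (∀ y ∈ l, y.2 ≤ m.2) →
    List.foldl (fun acc x => PySem.List.insertBy (fun a b : String × Int => decide (b.2 < a.2)) x acc) (m :: s) l
      = m :: List.foldl (fun acc x => PySem.List.insertBy (fun a b : String × Int => decide (b.2 < a.2)) x acc) s l := by
  induction l with
  | nil => intro s _; rfl
  | cons x l ih =>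
    intro s hle
    rw [List.foldl_cons, List.foldl_cons, pvInsertBy_cons,
        if_neg (by exact not_lt.2 (hle x (List.mem_cons_self)))]
    exact ih _ (fun y hy => hle y (List.mem_cons_of_mem _ hy))

lemma pvMem_foldl_ins (l : List (String × Int)) :
    ∀ (s : List (String × Int)) (y : String × Int),
    y ∈ List.foldl (fun acc x => PySem.List.insertBy (fun a b : String × Int => decide (b.2 < a.2)) x acc) s l
      → y ∈ s ∨ y ∈ l := by
  induction l with
  | nil => intro s y h; exact Or.inl h
  | cons x l ih =>
    intro s y h
    rw [List.foldl_cons] at h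
    rcases ih _ y h with hs | hl
    · rcases (PySem.List.mem_insertBy _ _ _ _).1 hs with rfl | hs
      · exact Or.inr (List.mem_cons_self)
      · exact Or.inl hs
    · exact Or.inr (List.mem_cons_of_mem _ hl)

lemma pvSorted_extract (l₁ l₂ : List (String × Int)) (m : String × Int)
    (h₁ : ∀ y ∈ l₁, y.2 < m.2) (h₂ : ∀ y ∈ l₂, y.2 ≤ m.2) :
    PySem.List.sorted (l₁ ++ m :: l₂) (fun kv => kv.2) true
      = m :: PySem.List.sorted (l₁ ++ l₂) (fun kv => kv.2) true := by
  rw [PySem.List.sorted_rev_eq_foldl_insertBy, PySem.List.sorted_rev_eq_foldl_insertBy,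
      List.foldl_append, List.foldl_append, List.foldl_cons]
  have hmem : ∀ y ∈ List.foldl (fun acc x => PySem.List.insertBy (fun a b : String × Int => decide (b.2 < a.2)) x acc) [] l₁, y.2 < m.2 := by
    intro y hy
    rcases pvMem_foldl_ins l₁ [] y hy with h | h
    · simp at h
    · exact h₁ y h
  have hins : PySem.List.insertBy (fun a b : String × Int => decide (b.2 < a.2)) m
      (List.foldl (fun acc x => PySem.List.insertBy (fun a b : String × Int => decide (b.2 < a.2)) x acc) [] l₁)
      = m :: List.foldl (fun acc x => PySem.List.insertBy (fun a b : String × Int => decide (b.2 < a.2)) x acc) [] l₁ := by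
    cases hc : List.foldl (fun acc x => PySem.List.insertBy (fun a b : String × Int => decide (b.2 < a.2)) x acc) [] l₁ with
    | nil => rfl
    | cons z zs =>
      rw [pvInsertBy_cons, if_pos]
      have := hmem z (by rw [hc]; exact List.mem_cons_self)
      exact this
  rw [hins]
  exact pvFold_ins_cons l₂ m _ h₂

lemma pvRemove?_split (l₁ l₂ : List (String × Int)) (m : String × Int)
    (h₁ : ∀ y ∈ l₁, y ≠ m) :
    PySem.List.remove? (l₁ ++ m :: l₂) m = some (l₁ ++ l₂) := by
  induction l₁ with
  | nil => simp [PySem.List.remove?, List.idxOf?, List.findIdx?_cons]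
  | cons x l₁ ih =>
    have hx : (x == m) = false := beq_eq_false_iff_ne.2 (h₁ x List.mem_cons_self)
    have ih' := ih (fun y hy => h₁ y (List.mem_cons_of_mem _ hy))
    simp only [PySem.List.remove?, List.idxOf?] at ih' ⊢
    obtain ⟨k, hk, he⟩ : ∃ k, List.findIdx? (fun y => y == m) (l₁ ++ m :: l₂) = some k ∧
        (l₁ ++ m :: l₂).eraseIdx k = l₁ ++ l₂ := by
      cases hfi : List.findIdx? (fun y => y == m) (l₁ ++ m :: l₂) with
      | none => rw [hfi] at ih'; simp at ih'
      | some k =>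
        rw [hfi] at ih'
        simp only [Option.map_some, Option.some_inj] at ih'
        exact ⟨k, rfl, ih'⟩
    simp [List.cons_append, List.findIdx?_cons, hx, hk, List.eraseIdx_cons_succ, he]

-- the selection loop computes a clamped take of the descending sort
lemma pvSelect_eq_take (n : Int) : ∀ (N : Nat) (items : List (String × Int)), items.length ≤ N →
    ∀ top : List (String × Int),
    pvSelect n top items = top ++ (PySem.List.sorted items (fun kv => kv.2) true).take (n - top.length).toNat := by
  intro N
  induction N with
  | zero =>
    intro items hN top
    have : items = [] := List.length_eq_zero_iff.1 (Nat.le_zero.1 hN)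
    subst this
    rw [pvSelect]
    simp [PySem.List.sorted]
  | succ N ih =>
    intro items hN top
    rw [pvSelect]
    by_cases hc : (top.length : Int) < n ∧ items ≠ []
    · rw [if_pos hc]
      cases hm : PySem.List.max? items (fun kv => kv.2) with
      | none => exact absurd ((PySem.List.max?_eq_none_iff _ _).1 hm) hc.2
      | some m =>
        obtain ⟨l₁, l₂, rfl, h1, h2⟩ := pvMax?_split items m hm
        have hne : ∀ y ∈ l₁, y ≠ m := fun y hy he =>
          absurd (h1 y hy) (by rw [he]; exact lt_irrefl _)
        have hrem := pvRemove?_split l₁ l₂ m hne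
        split
        case h_1 heq => simp at heq
        case h_2 rest heq =>
        injection heq with heq
        subst heq
        split
        case h_1 heq2 => rw [hrem] at heq2; simp at heq2
        case h_2 rest2 heq2 =>
        rw [hrem] at heq2
        injection heq2 with heq2
        subst heq2
        rw [ih (l₁ ++ l₂) (by simp at hN ⊢; omega) (top ++ [m]),
            pvSorted_extract l₁ l₂ m h1 h2]
        have hk : (n - top.length).toNat = (n - (top ++ [m]).length).toNat + 1 := by
          simp only [List.length_append, List.length_cons, List.length_nil]
          omega
        rw [hk, List.take_succ_cons, List.append_assoc]
        rfl
    · rw [if_neg hc]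
      rcases not_and_or.1 hc with hlen | hnil
      · have : (n - top.length).toNat = 0 := by omega
        rw [this, List.take_zero, List.append_nil]
      · have : items = [] := not_not.1 hnil
        subst this
        simp [PySem.List.sorted]

-- both ports over the SAME aggregated dict (A's guarded fold rewritten to B's fold)
lemma pvMain (songs : List (String × String × List (String × Int))) (num_artists : Int) :
    get_top_artists_by_duration songs num_artists
      = PySem.List.slice (PySem.List.sorted
          ((songs.foldl (fun (d : PySem.Dict String Int) s =>
              d.insert s.1 (d.getD s.1 0 + (PySem.Dict.mk s.2.2).getD "duration" 0)) PySem.Dict.empty).items)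
          (fun x => x.2) true) none (some num_artists) := by
  simp only [get_top_artists_by_duration]
  rw [PySem.List.foldl_congr_mem songs
      (fun (d : PySem.Dict String Int) (s : String × String × List (String × Int)) =>
        (if d.contains s.1 then d else d.insert s.1 0).insert s.1
          ((if d.contains s.1 then d else d.insert s.1 0).getD s.1 0 + (PySem.Dict.mk s.2.2).getD "duration" 0))
      (fun (d : PySem.Dict String Int) (s : String × String × List (String × Int)) =>
        d.insert s.1 (d.getD s.1 0 + (PySem.Dict.mk s.2.2).getD "duration" 0))
      PySem.Dict.empty
      (fun d s hs => pvAggStep_eq d s)]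

-- the aggregated dict has one item per distinct artist
lemma pvItemsLen (songs : List (String × String × List (String × Int))) :
    ((songs.foldl (fun (d : PySem.Dict String Int) s =>
        d.insert s.1 (d.getD s.1 0 + (PySem.Dict.mk s.2.2).getD "duration" 0)) PySem.Dict.empty).items).length
      = (PySem.Set.ofList (songs.map (fun s => s.1))).length := by
  have hk := PySem.Dict.keys_foldl_insert_key songs
      (fun s => s.1)
      (fun (d : PySem.Dict String Int) s => d.getD s.1 0 + (PySem.Dict.mk s.2.2).getD "duration" 0)
      PySem.Dict.empty
  have hlen : ∀ d : PySem.Dict String Int, d.keys.length = d.items.length := fun d => by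
    simp [PySem.Dict.keys]
  rw [← hlen, hk]
  simp [PySem.Dict.keys_empty, PySem.Set.update_nil_left]

lemma pvAlt_eq (songs : List (String × String × List (String × Int))) (num_artists : Int) :
    get_top_artists_by_duration_alt songs num_artists
      = (PySem.List.sorted
          ((songs.foldl (fun (d : PySem.Dict String Int) s =>
              d.insert s.1 (d.getD s.1 0 + (PySem.Dict.mk s.2.2).getD "duration" 0)) PySem.Dict.empty).items)
          (fun x => x.2) true).take num_artists.toNat := by
  simp only [get_top_artists_by_duration_alt]
  rw [pvSelect_eq_take num_artists _ _ (le_refl _) []]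
  simp

-- ===== VERDICT (by name: the statement is the Claim_ definition above) =====
theorem get_top_artists_by_duration_spec : Claim_equal_get_top_artists_by_duration := by
  intro songs num_artists _ hPre
  rw [Spec_get_top_artists_by_duration, pvMain, pvAlt_eq]
  rcases hPre.1 with hn | hcount
  · rw [PySem.List.slice_to _ hn]
  · by_cases hn : 0 ≤ num_artists
    · rw [PySem.List.slice_to _ hn]
    · set L := ((songs.foldl (fun (d : PySem.Dict String Int) s =>
          d.insert s.1 (d.getD s.1 0 + (PySem.Dict.mk s.2.2).getD "duration" 0)) PySem.Dict.empty).items) with hL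
      have hk : num_artists = -(((-num_artists).toNat : Nat) : Int) := by omega
      rw [hk, PySem.List.slice_to_neg_natCast _ _ (by omega)]
      have hlen : (PySem.List.sorted L (fun x => x.2) true).length = L.length :=
        List.Perm.length_eq (PySem.List.sorted_perm _ _ _)
      have hLlen := pvItemsLen songs
      rw [← hL] at hLlen
      have h0 : (PySem.List.sorted L (fun x => x.2) true).length - (-num_artists).toNat = 0 := by omega
      have h0' : (-(((-num_artists).toNat : Nat) : Int)).toNat = 0 := by omega
      rw [h0, h0']
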